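-- pv_equiv track=rewrite | github.com/Seek64/advent-of-code | solutions/day-13/day-13-part-1.py | find_horizontal_split
-- ===== SOURCE A (Python) =====
-- def find_horizontal_split(matrix):
--     for i in range(1, len(matrix)):
--         upper_part = "".join(matrix[:i][::-1])
--         lower_part = "".join(matrix[i:])
--         overlap_len = min(len(upper_part), len(lower_part))
--         if upper_part[:overlap_len] == lower_part[:overlap_len]:
--             return i
--     return 0
-- ===== SOURCE B (Python) =====
-- def find_horizontal_split(matrix):
--     # Expand outward from each candidate mirror line, comparing rows pair by pair
--     # with remainder carry for unequal lengths; no concatenated halves are built,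
--     # and the scan stops at the first mismatching chunk.
--     n = len(matrix)
--     for i in range(1, n):
--         j, k = i - 1, i          # next row above / below the line
--         a = b = ""               # unmatched remainders of the current rows
--         ok = True
--         while True:
--             if not a:
--                 if j < 0:
--                     break        # upper side exhausted: overlap matched
--                 a = matrix[j]
--                 j -= 1
--             elif not b:
--                 if k >= n:
--                     break        # lower side exhausted: overlap matched
--                 b = matrix[k]
--                 k += 1
--             else:
--                 m = len(a) if len(a) < len(b) else len(b)
--                 if a[:m] != b[:m]:
--                     ok = False
--                     break
--                 a = a[m:]
--                 b = b[m:]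
--         if ok:
--             return i
--     return 0
-- ===== Notes on version B (the rewrite author's own statement) =====
-- stated objective: faster
-- what changed: A materialises both halves per split (join the reversed upper rows and the lower rows) and compares min-length prefix slices; B never concatenates: it expands outward from the mirror line with two row pointers and remainder-carry chunk comparisons, aborting at the first mismatching chunk.
import Mathlib
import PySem

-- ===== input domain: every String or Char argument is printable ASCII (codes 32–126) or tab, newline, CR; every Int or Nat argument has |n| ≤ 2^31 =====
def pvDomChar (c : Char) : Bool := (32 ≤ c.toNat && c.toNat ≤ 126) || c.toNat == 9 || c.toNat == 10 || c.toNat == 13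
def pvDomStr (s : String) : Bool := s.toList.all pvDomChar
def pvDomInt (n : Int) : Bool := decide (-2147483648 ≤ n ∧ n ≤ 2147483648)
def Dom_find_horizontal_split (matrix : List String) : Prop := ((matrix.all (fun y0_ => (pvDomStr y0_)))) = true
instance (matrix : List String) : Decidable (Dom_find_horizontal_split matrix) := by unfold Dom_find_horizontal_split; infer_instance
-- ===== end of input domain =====

-- B replaces A's per-split concatenation of both halves and prefix-slice comparison by an
-- outward pairwise scan from the mirror line with remainder carry and early exit (objective: alternative).


-- ===== PORT A =====
-- loop body of A, iterating i over range(1, len(matrix));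
-- matrix[:i][::-1] is ported via PySem.List.slice and reverse;
-- "".join over str is PySem.Chars.join [] on the rows' code points.
def find_horizontal_split_goA (matrix : List String) : List Int → Int
  | [] => 0
  | i :: rest =>
    let upper := PySem.Chars.join [] (((PySem.List.slice matrix none (some i)).reverse).map String.toList)
    let lower := PySem.Chars.join [] ((PySem.List.slice matrix (some i) none).map String.toList)
    let overlap_len : Nat := min upper.length lower.length
    if PySem.List.slice upper none (some (overlap_len : Int))
        = PySem.List.slice lower none (some (overlap_len : Int)) then i
    else find_horizontal_split_goA matrix rest

def find_horizontal_split (matrix : List String) : Int :=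
  find_horizontal_split_goA matrix (PySem.List.pyRange 1 (matrix.length : Int) 1)

-- ===== PORT B =====
-- B's inner while loop: walk the rows above (nearest first) and below the line,
-- carrying the unmatched remainders a, b of the current row on each side.
def fhsScan : List (List Char) → List (List Char) → List Char → List Char → Bool
  | up, low, a, b =>
    if a = [] then
      match up with
      | [] => true                      -- upper side exhausted: overlap matched
      | r :: up' => fhsScan up' low r b
    else if b = [] then
      match low with
      | [] => true                      -- lower side exhausted: overlap matched
      | r :: low' => fhsScan up low' a r
    else
      let m := if a.length < b.length then a.length else b.length
      if ¬ (a.take m = b.take m) then false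
      else fhsScan up low (a.drop m) (b.drop m)
termination_by up low a b => (up.length + low.length, a.length + b.length)
decreasing_by
  · exact Prod.Lex.left _ _ (by simp)
  · exact Prod.Lex.left _ _ (by simp)
  · apply Prod.Lex.right
    have ha : a ≠ [] := by assumption
    have hb : b ≠ [] := by assumption
    have ha' : 0 < a.length := List.length_pos_iff.mpr ha
    have hb' : 0 < b.length := List.length_pos_iff.mpr hb
    simp only [List.length_drop]
    split <;> omega

-- B's outer for loop over range(1, len(matrix)): the rows above the line in
-- outward order are (matrix.take i).reverse, the rows below are matrix.drop i.
def find_horizontal_split_goB (matrix : List String) : List Int → Int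
  | [] => 0
  | i :: rest =>
    if fhsScan ((matrix.take i.toNat).reverse.map String.toList)
        ((matrix.drop i.toNat).map String.toList) [] [] then i
    else find_horizontal_split_goB matrix rest

def find_horizontal_split_alt (matrix : List String) : Int :=
  find_horizontal_split_goB matrix (PySem.List.pyRange 1 (matrix.length : Int) 1)

-- ===== PRECONDITION & SPEC =====
def Spec_find_horizontal_split (matrix : List String) (out : Int) : Prop := out = find_horizontal_split_alt matrix
instance (matrix : List String) (out : Int) : Decidable (Spec_find_horizontal_split matrix out) := by unfold Spec_find_horizontal_split; infer_instance

-- ===== CLAIM (what is proved, stated in full; the proofs are below) =====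
def Claim_equal_find_horizontal_split : Prop := ∀ (matrix : List String), Dom_find_horizontal_split matrix → Spec_find_horizontal_split matrix (find_horizontal_split matrix)

-- ===== LEMMAS AND PROOFS =====

-- "".join = flatten
lemma join_nil_eq_flatten (l : List (List Char)) :
    PySem.Chars.join [] l = l.flatten := by
  induction l with
  | nil => exact PySem.Chars.join_nil []
  | cons x xs ih =>
    cases xs with
    | nil => simp [PySem.Chars.join, List.intercalate]
    | cons y ys =>
      rw [PySem.Chars.join_cons_cons] at *
      simp [ih]

-- zip-all-equal ↔ equality of the overlapping prefixes
lemma zip_all_eq_iff_take (u v : List Char) :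
    ((u.zip v).all (fun p => p.1 == p.2) = true) ↔ u.take v.length = v.take u.length := by
  induction u generalizing v with
  | nil => simp
  | cons a u ih =>
    cases v with
    | nil => simp
    | cons b v =>
      simp only [List.zip_cons_cons, List.all_cons, List.length_cons, List.take_succ_cons,
        Bool.and_eq_true, beq_iff_eq, List.cons.injEq]
      exact and_congr Iff.rfl (ih v)

lemma take_min_left (u : List Char) (n : Nat) :
    u.take (min u.length n) = u.take n := by
  rcases le_total u.length n with h | h
  · rw [min_eq_left h, List.take_of_length_le (le_refl _), List.take_of_length_le h]
  · rw [min_eq_right h]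

-- B's scan computes the zip-all comparison of the two remaining character streams
lemma fhsScan_eq_zipall (up low : List (List Char)) (a b : List Char) :
    fhsScan up low a b
      = ((a ++ up.flatten).zip (b ++ low.flatten)).all (fun p => p.1 == p.2) := by
  induction up, low, a, b using fhsScan.induct with
  | case1 low b => rw [fhsScan.eq_def]; simp
  | case2 low b r up' ih => rw [fhsScan.eq_def]; simpa using ih
  | case3 up a ha =>
      rw [fhsScan.eq_def]
      simp only [if_neg ha]
      have : ((a ++ up.flatten).zip ([] : List Char)) = [] := by simp
      simp [this]
  | case4 up a ha r low' ih => rw [fhsScan.eq_def]; simp only [if_neg ha]; simpa using ih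
  | case5 up low a b ha hb m0 hne =>
      rw [fhsScan.eq_def]
      simp only [if_neg ha, if_neg hb]
      have hne' : ¬ (List.take (if a.length < b.length then a.length else b.length) a
          = List.take (if a.length < b.length then a.length else b.length) b) := hne
      rw [if_pos hne']
      set m := if a.length < b.length then a.length else b.length with hm
      have hmle : m ≤ a.length ∧ m ≤ b.length := by rw [hm]; split <;> omega
      have hlen : (a.take m).length = (b.take m).length := by
        simp [List.length_take]; omega
      rw [show a ++ up.flatten = a.take m ++ (a.drop m ++ up.flatten) by
            rw [← List.append_assoc, List.take_append_drop],
          show b ++ low.flatten = b.take m ++ (b.drop m ++ low.flatten) by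
            rw [← List.append_assoc, List.take_append_drop],
          List.zip_append hlen, List.all_append]
      have hfalse : ((a.take m).zip (b.take m)).all (fun p => p.1 == p.2) = false := by
        rw [← Bool.not_eq_true, zip_all_eq_iff_take, ← hlen, List.take_of_length_le (le_refl _),
          hlen, List.take_of_length_le (le_refl _)]
        exact hne'
      simp [hfalse]
  | case6 up low a b ha hb m0 hne ih =>
      rw [fhsScan.eq_def]
      simp only [if_neg ha, if_neg hb]
      have hne' : ¬ ¬ (List.take (if a.length < b.length then a.length else b.length) a
          = List.take (if a.length < b.length then a.length else b.length) b) := hne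
      rw [if_neg hne']
      set m := if a.length < b.length then a.length else b.length with hm
      have heq : a.take m = b.take m := not_not.mp hne'
      have hlen : (a.take m).length = (b.take m).length := by rw [heq]
      rw [show a ++ up.flatten = a.take m ++ (a.drop m ++ up.flatten) by
            rw [← List.append_assoc, List.take_append_drop],
          show b ++ low.flatten = b.take m ++ (b.drop m ++ low.flatten) by
            rw [← List.append_assoc, List.take_append_drop],
          List.zip_append hlen, List.all_append]
      have htrue : ((a.take m).zip (b.take m)).all (fun p => p.1 == p.2) = true := by
        rw [zip_all_eq_iff_take, ← hlen, List.take_of_length_le (le_refl _),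
          hlen, List.take_of_length_le (le_refl _)]
        exact heq
      rw [htrue, Bool.true_and]
      exact ih

-- A's per-i condition equals B's per-i condition (for the nonnegative i of range(1, n))
lemma cond_eq (matrix : List String) (i : Int) (hi : 0 ≤ i) :
    (let upper := PySem.Chars.join [] (((PySem.List.slice matrix none (some i)).reverse).map String.toList)
     let lower := PySem.Chars.join [] ((PySem.List.slice matrix (some i) none).map String.toList)
     let L : Nat := min upper.length lower.length
     PySem.List.slice upper none (some (L : Int)) = PySem.List.slice lower none (some (L : Int)))
    ↔ fhsScan ((matrix.take i.toNat).reverse.map String.toList)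
        ((matrix.drop i.toNat).map String.toList) [] [] = true := by
  rw [fhsScan_eq_zipall]
  simp only [PySem.List.slice_to matrix hi, PySem.List.slice_from matrix hi, join_nil_eq_flatten,
    List.nil_append]
  set u := ((matrix.take i.toNat).reverse.map String.toList).flatten with hu
  set v := ((matrix.drop i.toNat).map String.toList).flatten with hv
  rw [zip_all_eq_iff_take, PySem.List.slice_to_natCast u, PySem.List.slice_to_natCast v,
    take_min_left u v.length, min_comm, take_min_left v u.length]

lemma go_eq (matrix : List String) (l : List Int) (hl : ∀ i ∈ l, 0 ≤ i) :
    find_horizontal_split_goA matrix l = find_horizontal_split_goB matrix l := by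
  induction l with
  | nil => rfl
  | cons i rest ih =>
    have hi : 0 ≤ i := hl i (List.mem_cons_self ..)
    have hc := cond_eq matrix i hi
    simp only [find_horizontal_split_goA, find_horizontal_split_goB]
    simp only at hc
    by_cases h : fhsScan ((matrix.take i.toNat).reverse.map String.toList)
        ((matrix.drop i.toNat).map String.toList) [] [] = true
    · rw [if_pos (hc.mpr h), if_pos h]
    · rw [if_neg (fun hh => h (hc.mp hh)), if_neg h]
      exact ih (fun j hj => hl j (List.mem_cons_of_mem _ hj))

-- ===== VERDICT (by name: the statement is the Claim_ definition above) =====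
theorem find_horizontal_split_spec : Claim_equal_find_horizontal_split := by
  intro matrix _
  unfold Spec_find_horizontal_split find_horizontal_split find_horizontal_split_alt
  exact go_eq matrix _ (fun i hi => by
    have := (PySem.List.mem_pyRange_one).mp hi
    omega)
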